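-- pv_equiv track=rewrite | github.com/Tomeriko96/Optical-Music-Recognition-Tool | my_trial.py | find_items_within
-- ===== SOURCE A (Python) =====
-- def find_items_within(l1, l2, dist):
--     l1.sort()
--     l2.sort()
--     b = 0
--     e = 0
--     ans = []
--     for a in l1:
--         while b < len(l2) and a - l2[b] > dist:
--             b += 1
--         while e < len(l2) and l2[e] - a <= dist:
--             e += 1
--         ans.extend([(a,x) for x in l2[b:e]])
--     return ans
-- ===== SOURCE B (Python) =====
-- def find_items_within(l1, l2, dist):
--     l1.sort()
--     l2.sort()
--     return [(a, x) for a in l1 for x in l2 if a - dist <= x <= a + dist]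
-- ===== Notes on version B (the rewrite author's own statement) =====
-- stated objective: simpler
-- what changed: Replaces A's stateful two-pointer sliding window over sorted l2 (monotone b/e indices maintained across iterations of l1) with a single nested filtering comprehension that directly keeps every pair within distance; sortedness makes the filtered sublist identical to A's window.
import Mathlib
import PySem

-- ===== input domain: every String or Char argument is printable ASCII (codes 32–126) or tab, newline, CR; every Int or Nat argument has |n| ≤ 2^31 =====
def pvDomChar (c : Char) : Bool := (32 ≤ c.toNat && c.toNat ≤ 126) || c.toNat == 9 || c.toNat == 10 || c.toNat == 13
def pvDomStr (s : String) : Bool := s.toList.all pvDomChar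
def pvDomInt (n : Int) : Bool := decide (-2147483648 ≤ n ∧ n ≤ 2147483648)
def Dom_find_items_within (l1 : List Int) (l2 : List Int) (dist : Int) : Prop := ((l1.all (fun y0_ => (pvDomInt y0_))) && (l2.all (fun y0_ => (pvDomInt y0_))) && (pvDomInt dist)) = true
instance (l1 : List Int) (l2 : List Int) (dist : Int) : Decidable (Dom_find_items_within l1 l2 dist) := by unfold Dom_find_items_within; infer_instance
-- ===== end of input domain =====

-- B replaces A's stateful two-pointer window over sorted l2 with a single filtering
-- comprehension (simpler; not faster). Both A and B sort l1 and l2 in place (same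
-- mutation); the equivalence proved here is about the return value.

-- ===== PORT A =====
-- the first while loop: advance b while b < len(l2) and a - l2[b] > dist
def advB (l2 : List Int) (a : Int) (dist : Int) (b : Nat) : Nat :=
  if h : b < l2.length then
    (if a - l2[b] > dist then advB l2 a dist (b + 1) else b)
  else b
termination_by l2.length - b
decreasing_by omega

-- the second while loop: advance e while e < len(l2) and l2[e] - a <= dist
def advE (l2 : List Int) (a : Int) (dist : Int) (e : Nat) : Nat :=
  if h : e < l2.length then
    (if l2[e] - a ≤ dist then advE l2 a dist (e + 1) else e)
  else e
termination_by l2.length - e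
decreasing_by omega

def find_items_within (l1 : List Int) (l2 : List Int) (dist : Int) : List (Int × Int) :=
  let l1s := PySem.List.sorted l1 (fun x => x)
  let l2s := PySem.List.sorted l2 (fun x => x)
  let st := l1s.foldl (fun (st : Nat × Nat × List (Int × Int)) a =>
      let b := advB l2s a dist st.1
      let e := advE l2s a dist st.2.1
      (b, e, st.2.2 ++
        (PySem.List.slice l2s (some ((b : Nat) : Int)) (some ((e : Nat) : Int))).map
          (fun x => (a, x)))) (0, 0, ([] : List (Int × Int)))
  st.2.2

-- ===== PORT B =====
def find_items_within_alt (l1 : List Int) (l2 : List Int) (dist : Int) : List (Int × Int) :=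
  let l1s := PySem.List.sorted l1 (fun x => x)
  let l2s := PySem.List.sorted l2 (fun x => x)
  l1s.flatMap (fun a =>
    (l2s.filter (fun x => decide (a - dist ≤ x) && decide (x ≤ a + dist))).map
      (fun x => (a, x)))

-- ===== PRECONDITION & SPEC =====
def Spec_find_items_within (l1 : List Int) (l2 : List Int) (dist : Int) (out : List (Int × Int)) : Prop := out = find_items_within_alt l1 l2 dist
instance (l1 : List Int) (l2 : List Int) (dist : Int) (out : List (Int × Int)) : Decidable (Spec_find_items_within l1 l2 dist out) := by unfold Spec_find_items_within; infer_instance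

-- ===== CLAIM (what is proved, stated in full; the proofs are below) =====
def Claim_equal_find_items_within : Prop := ∀ (l1 : List Int) (l2 : List Int) (dist : Int), Dom_find_items_within l1 l2 dist → Spec_find_items_within l1 l2 dist (find_items_within l1 l2 dist)

-- ===== LEMMAS AND PROOFS =====

theorem pv_takeWhile_len_le {α : Type} (p : α → Bool) (l : List α) :
    (l.takeWhile p).length ≤ l.length :=
  (List.takeWhile_prefix p).length_le

-- inside the true prefix the test holds
theorem pv_takeWhile_getElem {α : Type} (p : α → Bool) (l : List α) :
    ∀ (i : Nat) (hi : i < (l.takeWhile p).length),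
      p (l[i]'(Nat.lt_of_lt_of_le hi (pv_takeWhile_len_le p l))) = true := by
  induction l with
  | nil => intro i hi; simp at hi
  | cons x t ih =>
    intro i hi
    by_cases hpx : p x = true
    · cases i with
      | zero => simpa using hpx
      | succ n =>
        have hi' : n < (t.takeWhile p).length := by
          simp [hpx] at hi; omega
        simpa using ih n hi'
    · simp [hpx] at hi

-- just past the true prefix the test fails
theorem pv_takeWhile_boundary {α : Type} (p : α → Bool) (l : List α)
    (h : (l.takeWhile p).length < l.length) :
    p (l[(l.takeWhile p).length]) = false := by
  induction l with
  | nil => simp at h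
  | cons x t ih =>
    by_cases hx : p x = true
    · simp only [List.takeWhile_cons, hx, if_true, List.length_cons] at h ⊢
      simpa using ih (by omega)
    · simp only [List.takeWhile_cons, Bool.not_eq_true] at hx ⊢
      simp [hx]

theorem pv_takeWhile_len_mono {α : Type} (p q : α → Bool) (l : List α)
    (h : ∀ y, p y = true → q y = true) :
    (l.takeWhile p).length ≤ (l.takeWhile q).length := by
  induction l with
  | nil => simp
  | cons x t ih =>
    by_cases hx : p x = true
    · simp [hx, h x hx]; omega
    · simp [List.takeWhile_cons, hx]

-- the first while loop stops exactly at the length of the true prefix of its test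
theorem pv_advB_eq (l2 : List Int) (a : Int) (dist : Int) :
    ∀ b, b ≤ (l2.takeWhile (fun y => decide (a - y > dist))).length →
      advB l2 a dist b = (l2.takeWhile (fun y => decide (a - y > dist))).length := by
  intro b hb
  induction hk : (l2.takeWhile (fun y => decide (a - y > dist))).length - b generalizing b with
  | zero =>
    have hbe : b = (l2.takeWhile (fun y => decide (a - y > dist))).length := by omega
    subst hbe
    rw [advB]
    split
    · next h =>
      have hfalse := pv_takeWhile_boundary (fun y => decide (a - y > dist)) l2 h
      simp only [decide_eq_false_iff_not] at hfalse
      simp [hfalse]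
    · rfl
  | succ k ih =>
    have hblt : b < (l2.takeWhile (fun y => decide (a - y > dist))).length := by omega
    have hlen : b < l2.length := Nat.lt_of_lt_of_le hblt (pv_takeWhile_len_le _ l2)
    have hp := pv_takeWhile_getElem (fun y => decide (a - y > dist)) l2 b hblt
    simp only [decide_eq_true_eq] at hp
    rw [advB]
    simp only [hlen, dif_pos, hp, if_pos]
    exact ih (b + 1) (by omega) (by omega)

-- the second while loop, likewise
theorem pv_advE_eq (l2 : List Int) (a : Int) (dist : Int) :
    ∀ e, e ≤ (l2.takeWhile (fun y => decide (y - a ≤ dist))).length →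
      advE l2 a dist e = (l2.takeWhile (fun y => decide (y - a ≤ dist))).length := by
  intro e he
  induction hk : (l2.takeWhile (fun y => decide (y - a ≤ dist))).length - e generalizing e with
  | zero =>
    have hee : e = (l2.takeWhile (fun y => decide (y - a ≤ dist))).length := by omega
    subst hee
    rw [advE]
    split
    · next h =>
      have hfalse := pv_takeWhile_boundary (fun y => decide (y - a ≤ dist)) l2 h
      simp only [decide_eq_false_iff_not] at hfalse
      rw [if_neg hfalse]
    · rfl
  | succ k ih =>
    have helt : e < (l2.takeWhile (fun y => decide (y - a ≤ dist))).length := by omega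
    have hlen : e < l2.length := Nat.lt_of_lt_of_le helt (pv_takeWhile_len_le _ l2)
    have hp := pv_takeWhile_getElem (fun y => decide (y - a ≤ dist)) l2 e helt
    simp only [decide_eq_true_eq] at hp
    rw [advE]
    simp only [hlen, dif_pos, hp, if_pos]
    exact ih (e + 1) (by omega) (by omega)

-- on a sorted list, a downward-closed filter is a takeWhile
theorem pv_filter_eq_takeWhile (q : Int → Bool) (l : List Int)
    (hs : l.Pairwise (· ≤ ·))
    (hdc : ∀ u v : Int, u ≤ v → q v = true → q u = true) :
    l.filter q = l.takeWhile q := by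
  induction l with
  | nil => rfl
  | cons z t ih =>
    rw [List.pairwise_cons] at hs
    by_cases hz : q z = true
    · simp [hz, ih hs.2]
    · simp only [Bool.not_eq_true] at hz
      simp only [List.filter_cons, List.takeWhile_cons, hz, Bool.false_eq_true, if_false]
      rw [List.filter_eq_nil_iff.mpr]
      intro w hw
      simp only [Bool.not_eq_true]
      by_contra hqw
      simp only [Bool.not_eq_false] at hqw
      have := hdc z w (hs.1 w hw) hqw
      rw [this] at hz; exact Bool.true_eq_false.mp hz

-- the window l2[b:e] the two-pointer loop emits is exactly the in-range filter
theorem pv_slice_eq_filter (l2 : List Int) (a : Int) (dist : Int)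
    (hs : l2.Pairwise (· ≤ ·)) :
    List.take ((l2.takeWhile (fun y => decide (y - a ≤ dist))).length -
        (l2.takeWhile (fun y => decide (a - y > dist))).length)
      (List.drop ((l2.takeWhile (fun y => decide (a - y > dist))).length) l2) =
      l2.filter (fun x => decide (a - dist ≤ x) && decide (x ≤ a + dist)) := by
  induction l2 with
  | nil => rfl
  | cons y t ih =>
    rw [List.pairwise_cons] at hs
    by_cases hp : (a - y > dist)
    · by_cases hq : (y - a ≤ dist)
      · -- y strictly below the range
        simp only [List.takeWhile_cons, hp, hq, decide_true, if_true, List.length_cons,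
          List.drop_succ_cons, List.filter_cons, Nat.succ_sub_succ]
        have hcy : (decide (a - dist ≤ y) && decide (y ≤ a + dist)) = false := by
          simp; intro h; omega
        rw [hcy]
        simp only [Bool.false_eq_true, if_false]
        exact ih hs.2
      · -- y below and above the range: dist < 0, everything empty
        simp only [List.takeWhile_cons, hp, hq, decide_true, decide_false, if_true,
          Bool.false_eq_true, if_false, List.length_nil, List.length_cons,
          Nat.zero_sub, List.take_zero, List.filter_cons]
        have hcy : (decide (a - dist ≤ y) && decide (y ≤ a + dist)) = false := by
          simp; intro h; omega
        rw [hcy]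
        simp only [Bool.false_eq_true, if_false]
        rw [eq_comm, List.filter_eq_nil_iff]
        intro w hw
        have hyw := hs.1 w hw
        simp; intro h; omega
    · by_cases hq : (y - a ≤ dist)
      · -- y in range: keep it, and the rest of the window is a pure takeWhile
        simp only [List.takeWhile_cons, hp, hq, decide_true, decide_false,
          Bool.false_eq_true, if_false, if_true, List.length_nil, List.length_cons,
          List.drop_zero, Nat.sub_zero, List.take_succ_cons, List.filter_cons]
        have hcy : (decide (a - dist ≤ y) && decide (y ≤ a + dist)) = true := by
          simp; omega
        rw [hcy, if_pos rfl]
        congr 1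
        have hcong : t.filter (fun x => decide (a - dist ≤ x) && decide (x ≤ a + dist)) =
            t.filter (fun x => decide (x - a ≤ dist)) := by
          apply List.filter_congr
          intro w hw
          have hyw := hs.1 w hw
          rw [Bool.eq_iff_iff]
          simp only [Bool.and_eq_true, decide_eq_true_eq]
          omega
        rw [hcong, pv_filter_eq_takeWhile _ _ hs.2 (by intro u v huv hv; simp at hv ⊢; omega)]
        exact ((List.prefix_iff_eq_take).mp (List.takeWhile_prefix _)).symm
      · -- y above the range: window and filter both end here
        simp only [List.takeWhile_cons, hp, hq, decide_false,
          Bool.false_eq_true, if_false, List.length_nil, Nat.zero_sub, List.take_zero,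
          List.filter_cons]
        have hcy : (decide (a - dist ≤ y) && decide (y ≤ a + dist)) = false := by
          simp; intro h; omega
        rw [hcy]
        simp only [Bool.false_eq_true, if_false]
        rw [eq_comm, List.filter_eq_nil_iff]
        intro w hw
        have hyw := hs.1 w hw
        simp; intro h; omega

theorem pv_BL_mono (l2 : List Int) (dist : Int) {a a' : Int} (h : a ≤ a') :
    (l2.takeWhile (fun y => decide (a - y > dist))).length ≤
      (l2.takeWhile (fun y => decide (a' - y > dist))).length := by
  apply pv_takeWhile_len_mono
  intro y hy; simp at hy ⊢; omega

theorem pv_BR_mono (l2 : List Int) (dist : Int) {a a' : Int} (h : a ≤ a') :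
    (l2.takeWhile (fun y => decide (y - a ≤ dist))).length ≤
      (l2.takeWhile (fun y => decide (y - a' ≤ dist))).length := by
  apply pv_takeWhile_len_mono
  intro y hy; simp at hy ⊢; omega

theorem pv_loop_eq (l2s : List Int) (dist : Int) (h2 : l2s.Pairwise (· ≤ ·)) :
    ∀ (l1s : List Int) (b e : Nat) (acc : List (Int × Int)),
      l1s.Pairwise (· ≤ ·) →
      (∀ a ∈ l1s, b ≤ (l2s.takeWhile (fun y => decide (a - y > dist))).length) →
      (∀ a ∈ l1s, e ≤ (l2s.takeWhile (fun y => decide (y - a ≤ dist))).length) →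
      (l1s.foldl (fun (st : Nat × Nat × List (Int × Int)) a =>
        let b := advB l2s a dist st.1
        let e := advE l2s a dist st.2.1
        (b, e, st.2.2 ++
          (PySem.List.slice l2s (some ((b : Nat) : Int)) (some ((e : Nat) : Int))).map
            (fun x => (a, x)))) (b, e, acc)).2.2 =
      acc ++ l1s.flatMap (fun a =>
        (l2s.filter (fun x => decide (a - dist ≤ x) && decide (x ≤ a + dist))).map
          (fun x => (a, x))) := by
  intro l1s
  induction l1s with
  | nil => intro b e acc _ _ _; simp
  | cons a t ih =>
    intro b e acc h1 hb he
    rw [List.pairwise_cons] at h1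
    have hba := hb a (List.mem_cons_self)
    have hea := he a (List.mem_cons_self)
    simp only [List.foldl_cons]
    rw [pv_advB_eq l2s a dist b hba, pv_advE_eq l2s a dist e hea,
      PySem.List.slice_natCast, pv_slice_eq_filter l2s a dist h2,
      ih _ _ _ h1.2
        (fun a' ha' => pv_BL_mono l2s dist (h1.1 a' ha'))
        (fun a' ha' => pv_BR_mono l2s dist (h1.1 a' ha'))]
    simp [List.flatMap_cons, List.append_assoc]

-- ===== VERDICT (by name: the statement is the Claim_ definition above) =====
theorem find_items_within_spec : Claim_equal_find_items_within := by
  intro l1 l2 dist _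
  unfold Spec_find_items_within find_items_within find_items_within_alt
  have h2 : (PySem.List.sorted l2 (fun x => x)).Pairwise (· ≤ ·) := by
    simpa using PySem.List.sorted_pairwise l2 (fun x => x)
  have h1 : (PySem.List.sorted l1 (fun x => x)).Pairwise (· ≤ ·) := by
    simpa using PySem.List.sorted_pairwise l1 (fun x => x)
  exact pv_loop_eq (PySem.List.sorted l2 (fun x => x)) dist h2
    (PySem.List.sorted l1 (fun x => x)) 0 0 [] h1
    (fun a _ => Nat.zero_le _) (fun a _ => Nat.zero_le _)
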